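-- pv_equiv track=rewrite | github.com/ryanmt95/ds-and-algorithms | greedy_algorithms/mad_scientist.py | mad_scientist
-- ===== SOURCE A (Python) =====
-- def mad_scientist(num, cows_a, cows_b):
--     count = 0
--     match = True
--
--     for i in range(num):
--         if cows_a[i] == cows_b[i]:
--             match = True
--         else:
--             if match: count += 1
--             match = False
--
--     return count
-- ===== SOURCE B (Python) =====
-- def mad_scientist(num, cows_a, cows_b):
--     bad = {i for i in range(num) if cows_a[i] != cows_b[i]}
--     return sum(1 for i in bad if i - 1 not in bad)
-- ===== Notes on version B (the rewrite author's own statement) =====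
-- stated objective: alternative
-- what changed: Replaces the stateful match-flag scan with a set-based formulation: collect the mismatch indices into a hash set, then count block starts by membership tests (indices i in the set with i-1 not in the set), with no sequential state at all.
import Mathlib
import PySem

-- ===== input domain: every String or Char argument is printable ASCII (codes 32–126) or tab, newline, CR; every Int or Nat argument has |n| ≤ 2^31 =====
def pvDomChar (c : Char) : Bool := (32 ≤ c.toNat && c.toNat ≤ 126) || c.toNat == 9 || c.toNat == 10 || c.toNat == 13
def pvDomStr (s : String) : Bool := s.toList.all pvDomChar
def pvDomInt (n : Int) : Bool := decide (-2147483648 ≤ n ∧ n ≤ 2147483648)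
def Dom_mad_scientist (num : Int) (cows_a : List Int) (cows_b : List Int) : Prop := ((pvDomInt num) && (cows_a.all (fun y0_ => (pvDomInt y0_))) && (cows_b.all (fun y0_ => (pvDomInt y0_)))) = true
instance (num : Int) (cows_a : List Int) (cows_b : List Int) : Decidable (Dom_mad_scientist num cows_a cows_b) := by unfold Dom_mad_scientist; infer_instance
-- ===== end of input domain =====

-- B replaces A's stateful match-flag scan by a set of mismatch indices: block starts are members whose predecessor index is not a member (alternative decomposition, same cost).


-- ===== PORT A =====
-- literal port of A: one pass over range(num) carrying (count, match); indexing is exact inside Pre_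
def mad_scientist (num : Int) (cows_a : List Int) (cows_b : List Int) : Int :=
  ((PySem.List.pyRange 0 num 1).foldl
    (fun (s : Int × Bool) i =>
      if PySem.List.pyGetD cows_a i 0 = PySem.List.pyGetD cows_b i 0 then (s.1, true)
      else ((if s.2 then s.1 + 1 else s.1), false))
    (0, true)).1

-- ===== PORT B =====
-- port of B: the set of mismatch indices, then count members whose predecessor index is not a member
def mad_scientist_alt (num : Int) (cows_a : List Int) (cows_b : List Int) : Int :=
  let bad : PySem.Set Int := PySem.Set.ofList
    ((PySem.List.pyRange 0 num 1).filter
      (fun i => !(PySem.List.pyGetD cows_a i 0 == PySem.List.pyGetD cows_b i 0)))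
  ((bad.countP (fun i => !(PySem.Set.contains bad (i - 1))) : Int))

-- ===== PRECONDITION & SPEC =====
-- Pre_ excludes exactly the inputs where Python A raises IndexError: num larger than a list length
def Pre_mad_scientist (num : Int) (cows_a : List Int) (cows_b : List Int) : Prop :=
  num ≤ (cows_a.length : Int) ∧ num ≤ (cows_b.length : Int)
instance (num : Int) (cows_a : List Int) (cows_b : List Int) : Decidable (Pre_mad_scientist num cows_a cows_b) := by unfold Pre_mad_scientist; infer_instance
def pvWitness_mad_scientist : Int × List Int × List Int := (3, [1, 2, 3], [1, 5, 3])
def Spec_mad_scientist (num : Int) (cows_a : List Int) (cows_b : List Int) (out : Int) : Prop := out = mad_scientist_alt num cows_a cows_b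
instance (num : Int) (cows_a : List Int) (cows_b : List Int) (out : Int) : Decidable (Spec_mad_scientist num cows_a cows_b out) := by unfold Spec_mad_scientist; infer_instance

-- ===== CLAIM =====
def Claim_equal_mad_scientist : Prop := ∀ (num : Int) (cows_a : List Int) (cows_b : List Int), Dom_mad_scientist num cows_a cows_b → Pre_mad_scientist num cows_a cows_b → Spec_mad_scientist num cows_a cows_b (mad_scientist num cows_a cows_b)

-- ===== LEMMAS AND PROOFS =====

-- the list of mismatch indices below n
def madF (diff : Int → Bool) (n : Int) : List Int :=
  (PySem.List.pyRange 0 n 1).filter diff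

theorem mem_madF (diff : Int → Bool) (n i : Int) :
    i ∈ madF diff n ↔ (0 ≤ i ∧ i < n) ∧ diff i = true := by
  simp [madF, PySem.List.mem_pyRange_one]

-- invariant of A's flag loop: after n steps the count is B's set count below n and
-- the flag records whether position n-1 matched (vacuously true at n = 0)
theorem mad_loop_inv (diff : Int → Bool) (n : Nat) :
    (PySem.List.pyRange 0 (n : Int) 1).foldl
      (fun (s : Int × Bool) i =>
        if diff i = false then (s.1, true) else ((if s.2 then s.1 + 1 else s.1), false))
      (0, true)
    = ( ((madF diff n).countP (fun i => !((madF diff n).contains (i - 1))) : Int),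
        (decide (n = 0) || !diff ((n : Int) - 1)) ) := by
  induction n with
  | zero => simp [madF]
  | succ m ih =>
    have hc : ((m + 1 : Nat) : Int) = (m : Int) + 1 := by push_cast; ring
    have hc1 : (m : Int) + 1 - 1 = (m : Int) := by ring
    rw [hc]
    have hsplit : PySem.List.pyRange 0 ((m : Int) + 1) 1
        = PySem.List.pyRange 0 (m : Int) 1 ++ [(m : Int)] :=
      PySem.List.pyRange_one_succ_right (a := 0) (b := (m : Int)) (by positivity)
    have hF : madF diff ((m : Int) + 1)
        = madF diff (m : Int) ++ (if diff (m : Int) then [(m : Int)] else []) := by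
      unfold madF
      rw [hsplit, List.filter_append]
      by_cases h : diff (m : Int) <;> simp [h]
    -- predicate agrees on old elements: their predecessor is below m, so membership unchanged
    have hcongr : (madF diff (m : Int)).countP
          (fun i => !((madF diff ((m : Int) + 1)).contains (i - 1)))
        = (madF diff (m : Int)).countP
          (fun i => !((madF diff (m : Int)).contains (i - 1))) := by
      apply List.countP_congr
      intro i hi
      have hi' := (mem_madF diff (m : Int) i).mp hi
      have hmem : (i - 1) ∈ madF diff ((m : Int) + 1) ↔ (i - 1) ∈ madF diff (m : Int) := by
        rw [mem_madF, mem_madF]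
        constructor
        · rintro ⟨⟨h0, hlt⟩, hd⟩; exact ⟨⟨h0, by omega⟩, hd⟩
        · rintro ⟨⟨h0, hlt⟩, hd⟩; exact ⟨⟨h0, by omega⟩, hd⟩
      simp only [List.contains_eq_mem, hmem]
    rw [hsplit, List.foldl_append, ih]
    by_cases hd : diff (m : Int)
    · -- mismatch at m: A increments iff flag set; B gains m, counted iff m-1 not in the set
      have hm1 : ((m : Int) - 1) ∈ madF diff ((m : Int) + 1) ↔
          (1 ≤ m ∧ diff ((m : Int) - 1) = true) := by
        rw [mem_madF]
        constructor
        · rintro ⟨⟨h0, _⟩, h⟩; exact ⟨by omega, h⟩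
        · rintro ⟨h1, h⟩; exact ⟨⟨by omega, by omega⟩, h⟩
      set P : Int → Bool := fun i => !((madF diff ((m : Int) + 1)).contains (i - 1)) with hP
      have hsum : (madF diff ((m : Int) + 1)).countP P
          = (madF diff (m : Int)).countP P + (if P (m : Int) then 1 else 0) := by
        conv_lhs => rw [hF]
        rw [List.countP_append]
        simp [hd, List.countP_cons]
      have hPm : P (m : Int) = (decide (m = 0) || !diff ((m : Int) - 1)) := by
        by_cases hm : m = 0
        · subst hm
          have hnot : ¬ ((-1 : Int) ∈ madF diff 1) := by
            rw [mem_madF]; rintro ⟨⟨h0, _⟩, _⟩; omega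
          simp [hP, List.contains_eq_mem, hnot]
        · by_cases hp : diff ((m : Int) - 1)
          · have hin : ((m : Int) - 1) ∈ madF diff ((m : Int) + 1) :=
              hm1.mpr ⟨by omega, hp⟩
            simp [hP, List.contains_eq_mem, hin, hm, hp]
          · have hnot : ¬ (((m : Int) - 1) ∈ madF diff ((m : Int) + 1)) :=
              fun h => hp (hm1.mp h).2
            simp [hP, List.contains_eq_mem, hnot, hm, hp]
      show _ = (((madF diff ((m : Int) + 1)).countP P : Int), _)
      rw [hsum, hcongr, hPm, hc1]
      cases hb : (decide (m = 0) || !diff ((m : Int) - 1)) <;> simp [hd]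
    · -- match at m: count and set unchanged, flag reset to true
      rw [hF, hc1]
      simp [hd]

theorem madF_nodup (diff : Int → Bool) (n : Int) : (madF diff n).Nodup :=
  (PySem.List.nodup_pyRange_one 0 n).filter diff

theorem mad_scientist_eq (num : Int) (cows_a : List Int) (cows_b : List Int) :
    mad_scientist num cows_a cows_b = mad_scientist_alt num cows_a cows_b := by
  set diff : Int → Bool :=
    fun i => !(PySem.List.pyGetD cows_a i 0 == PySem.List.pyGetD cows_b i 0) with hdiff
  have hstep :
      (fun (s : Int × Bool) (i : Int) =>
        if PySem.List.pyGetD cows_a i 0 = PySem.List.pyGetD cows_b i 0 then (s.1, true)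
        else ((if s.2 then s.1 + 1 else s.1), false))
      = (fun (s : Int × Bool) (i : Int) =>
          if diff i = false then (s.1, true) else ((if s.2 then s.1 + 1 else s.1), false)) := by
    funext s i
    by_cases h : PySem.List.pyGetD cows_a i 0 = PySem.List.pyGetD cows_b i 0 <;> simp [hdiff, h]
  have hset : PySem.Set.ofList (madF diff num) = madF diff num :=
    PySem.Set.ofList_eq_self_of_nodup (madF diff num) (madF_nodup diff num)
  unfold mad_scientist mad_scientist_alt
  rw [hstep]
  show _ = ((PySem.Set.ofList (madF diff num)).countP
      (fun i => !(PySem.Set.contains (PySem.Set.ofList (madF diff num)) (i - 1))) : Int)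
  rw [hset]
  by_cases hle : num ≤ 0
  · rw [PySem.List.pyRange_one_eq_nil hle]
    unfold madF
    rw [PySem.List.pyRange_one_eq_nil hle]
    simp [PySem.Set.contains]
  · obtain ⟨n, rfl⟩ : ∃ n : Nat, num = (n : Int) :=
      ⟨num.toNat, (Int.toNat_of_nonneg (by omega)).symm⟩
    rw [mad_loop_inv diff n]
    simp [PySem.Set.contains]

-- ===== VERDICT =====
theorem mad_scientist_spec : Claim_equal_mad_scientist := by
  intro num cows_a cows_b _ _
  exact mad_scientist_eq num cows_a cows_b
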